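-- pv_equiv track=rewrite | github.com/MonsieurNam/object_video_retrieval | query_library_v7.py | fill_gaps
-- ===== SOURCE A (Python) =====
-- def fill_gaps(frame_list: list, max_gap_size: int = 15) -> list:
--     if len(frame_list) < 2: return frame_list
--     frame_set = set(frame_list)
--     full_range = range(frame_list[0], frame_list[-1] + 1)
--     filled_list = [f for f in full_range if f in frame_set or \
--                    (min([abs(f - x) for x in frame_set if x < f] or [max_gap_size+2]) + \
--                     min([abs(f - x) for x in frame_set if x > f] or [max_gap_size+2])) <= max_gap_size + 1]
--     return filled_list
-- ===== SOURCE B (Python) =====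
-- def fill_gaps(frame_list: list, max_gap_size: int = 15) -> list:
--     if len(frame_list) < 2:
--         return frame_list
--     lo, hi = frame_list[0], frame_list[-1]
--     s = sorted({x for x in frame_list if lo <= x <= hi})
--     if not s:
--         return []
--     out = [s[0]]
--     prev = s[0]
--     for x in s[1:]:
--         if x - prev <= max_gap_size + 1:
--             out.extend(range(prev + 1, x + 1))
--         else:
--             out.append(x)
--         prev = x
--     return out
-- ===== Notes on version B (the rewrite author's own statement) =====
-- stated objective: faster
-- what changed: Instead of testing every frame of range(first, last) against the whole set twice (nearest lower/higher scans), B sorts the distinct in-window frames once and fills each gap between consecutive frames wholesale when its width is at most max_gap_size+1.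
import Mathlib
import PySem

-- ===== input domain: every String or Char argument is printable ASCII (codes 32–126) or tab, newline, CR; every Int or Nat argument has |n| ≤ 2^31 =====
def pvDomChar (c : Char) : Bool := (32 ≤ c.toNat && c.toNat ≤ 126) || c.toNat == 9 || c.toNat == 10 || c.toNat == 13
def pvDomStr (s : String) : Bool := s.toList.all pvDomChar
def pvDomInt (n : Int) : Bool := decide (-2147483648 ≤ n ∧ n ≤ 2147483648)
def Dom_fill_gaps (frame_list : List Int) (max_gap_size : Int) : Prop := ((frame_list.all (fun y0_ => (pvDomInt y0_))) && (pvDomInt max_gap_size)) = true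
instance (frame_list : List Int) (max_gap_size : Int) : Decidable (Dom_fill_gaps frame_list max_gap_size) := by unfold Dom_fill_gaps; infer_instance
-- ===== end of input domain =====

-- B replaces A's two set scans per frame of the whole index range by one sorted pass over the
-- distinct frames that fills each small gap wholesale (objective: faster).

-- ===== PORT A =====
-- A-side helpers: the two `min([abs(f-x) for x in frame_set if ...] or [max_gap_size+2])` expressions
def pyMinLow (S : List Int) (g f : Int) : Int :=
  match PySem.List.min? ((S.filter (fun x => decide (x < f))).map (fun x => |f - x|)) (fun m => m) with
  | some m => m
  | none => g + 2

def pyMinHigh (S : List Int) (g f : Int) : Int :=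
  match PySem.List.min? ((S.filter (fun x => decide (f < x))).map (fun x => |f - x|)) (fun m => m) with
  | some m => m
  | none => g + 2

-- the comprehension's condition `f in frame_set or (min(...) + min(...)) <= max_gap_size + 1`
def condA (S : PySem.Set Int) (g f : Int) : Bool :=
  PySem.Set.contains S f || decide (pyMinLow S g f + pyMinHigh S g f ≤ g + 1)

def fill_gaps (frame_list : List Int) (max_gap_size : Int) : List Int :=
  if frame_list.length < 2 then frame_list else
  let frame_set : PySem.Set Int := PySem.Set.ofList frame_list
  -- frame_list[0] / frame_list[-1]: both indices are in range here (len ≥ 2), so `.getD 0` never fires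
  let lo := (PySem.List.pyGet? frame_list 0).getD 0
  let hi := (PySem.List.pyGet? frame_list (-1)).getD 0
  (PySem.List.pyRange lo (hi + 1)).filter (condA frame_set max_gap_size)

-- ===== PORT B =====
-- B-side helper: the `for x in s[1:]` loop with accumulators `out`, `prev`
def fillGapsGo (g : Int) (prev : Int) (out : List Int) : List Int → List Int
  | [] => out
  | x :: rest =>
    if x - prev ≤ g + 1 then fillGapsGo g x (out ++ PySem.List.pyRange (prev + 1) (x + 1)) rest
    else fillGapsGo g x (out ++ [x]) rest

def fill_gaps_alt (frame_list : List Int) (max_gap_size : Int) : List Int :=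
  if frame_list.length < 2 then frame_list else
  let lo := (PySem.List.pyGet? frame_list 0).getD 0
  let hi := (PySem.List.pyGet? frame_list (-1)).getD 0
  match PySem.List.sorted
      (PySem.Set.ofList (frame_list.filter (fun x => decide (lo ≤ x) && decide (x ≤ hi))))
      (fun x => x) with
  | [] => []
  | x :: rest => fillGapsGo max_gap_size x [x] rest

-- ===== PRECONDITION & SPEC =====
def Spec_fill_gaps (frame_list : List Int) (max_gap_size : Int) (out : List Int) : Prop := out = fill_gaps_alt frame_list max_gap_size
instance (frame_list : List Int) (max_gap_size : Int) (out : List Int) : Decidable (Spec_fill_gaps frame_list max_gap_size out) := by unfold Spec_fill_gaps; infer_instance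

-- ===== CLAIM (what is proved, stated in full; the proofs are below) =====
def Claim_equal_fill_gaps : Prop := ∀ (frame_list : List Int) (max_gap_size : Int), Dom_fill_gaps frame_list max_gap_size → Spec_fill_gaps frame_list max_gap_size (fill_gaps frame_list max_gap_size)

-- ===== LEMMAS AND PROOFS =====

lemma condA_of_mem {S : PySem.Set Int} {g f : Int} (h : f ∈ S) : condA S g f = true := by
  simp [condA, PySem.Set.contains, h]

lemma min_low_eq (S : List Int) (g f p : Int) (hp : p ∈ S) (hpf : p < f)
    (hmax : ∀ x ∈ S, x < f → x ≤ p) : pyMinLow S g f = f - p := by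
  have hmem : (f - p) ∈ (S.filter (fun x => decide (x < f))).map (fun x => |f - x|) := by
    refine List.mem_map.2 ⟨p, List.mem_filter.2 ⟨hp, by simpa using hpf⟩, ?_⟩
    exact abs_of_pos (by omega)
  unfold pyMinLow
  cases hmin : PySem.List.min? ((S.filter (fun x => decide (x < f))).map (fun x => |f - x|)) (fun m => m) with
  | none =>
      rw [PySem.List.min?_eq_none_iff] at hmin
      rw [hmin] at hmem; simp at hmem
  | some m =>
      have h1 := PySem.List.min?_mem hmin
      have h2 := PySem.List.min?_isMin hmin (f - p) hmem
      obtain ⟨x, hx, rfl⟩ := List.mem_map.1 h1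
      obtain ⟨hxS, hxf⟩ := List.mem_filter.1 hx
      have hxf' : x < f := by simpa using hxf
      have hxp : x ≤ p := hmax x hxS hxf'
      have habs : |f - x| = f - x := abs_of_pos (by omega)
      simp only [habs] at h2 ⊢
      omega

lemma min_high_eq (S : List Int) (g f q : Int) (hq : q ∈ S) (hfq : f < q)
    (hmin : ∀ x ∈ S, f < x → q ≤ x) : pyMinHigh S g f = q - f := by
  have hmem : (q - f) ∈ (S.filter (fun x => decide (f < x))).map (fun x => |f - x|) := by
    refine List.mem_map.2 ⟨q, List.mem_filter.2 ⟨hq, by simpa using hfq⟩, ?_⟩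
    rw [abs_of_neg (by omega)]; ring
  unfold pyMinHigh
  cases hmin' : PySem.List.min? ((S.filter (fun x => decide (f < x))).map (fun x => |f - x|)) (fun m => m) with
  | none =>
      rw [PySem.List.min?_eq_none_iff] at hmin'
      rw [hmin'] at hmem; simp at hmem
  | some m =>
      have h1 := PySem.List.min?_mem hmin'
      have h2 := PySem.List.min?_isMin hmin' (q - f) hmem
      obtain ⟨x, hx, rfl⟩ := List.mem_map.1 h1
      obtain ⟨hxS, hxf⟩ := List.mem_filter.1 hx
      have hxf' : f < x := by simpa using hxf
      have hxq : q ≤ x := hmin x hxS hxf'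
      have habs : |f - x| = x - f := by rw [abs_of_neg (by omega)]; ring
      simp only [habs] at h2 ⊢
      omega

lemma condA_interior {S : List Int} {g p q f : Int} (hp : p ∈ S) (hq : q ∈ S)
    (hpf : p < f) (hfq : f < q) (hsep : ∀ x ∈ S, x ≤ p ∨ q ≤ x) :
    condA S g f = decide (q - p ≤ g + 1) := by
  have hfn : f ∉ S := by
    intro h; rcases hsep f h with h' | h' <;> omega
  have h1 := min_low_eq S g f p hp hpf (fun x hx hxf => (hsep x hx).resolve_right (by omega))
  have h2 := min_high_eq S g f q hq hfq (fun x hx hfx => (hsep x hx).resolve_left (by omega))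
  simp only [condA, h1, h2, PySem.Set.contains, List.contains_eq_mem, decide_eq_false hfn,
    Bool.false_or]
  exact decide_eq_decide.2 (by omega)

lemma seg_filter {S : List Int} (g : Int) {p q : Int} (hp : p ∈ S) (hq : q ∈ S) (hpq : p < q)
    (hsep : ∀ x ∈ S, x ≤ p ∨ q ≤ x) :
    (PySem.List.pyRange (p + 1) (q + 1)).filter (condA S g) =
      if q - p ≤ g + 1 then PySem.List.pyRange (p + 1) (q + 1) else [q] := by
  rw [PySem.List.pyRange_one_succ_right (by omega), List.filter_append]
  have hqT : condA S g q = true := condA_of_mem hq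
  have hfilt : ∀ f ∈ PySem.List.pyRange (p + 1) q, condA S g f = decide (q - p ≤ g + 1) := by
    intro f hf
    have := PySem.List.mem_pyRange_one.1 hf
    exact condA_interior hp hq (by omega) (by omega) hsep
  by_cases hg : q - p ≤ g + 1
  · rw [if_pos hg, List.filter_eq_self.2 (fun f hf => by rw [hfilt f hf]; simpa using hg)]
    simp [hqT]
  · rw [if_neg hg, List.filter_eq_nil_iff.2 (fun f hf => by rw [hfilt f hf]; simpa using hg)]
    simp [hqT]

lemma pairwise_getLastD_max : ∀ (t : List Int) (a : Int), List.Pairwise (· < ·) (a :: t) →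
    (t.getLastD a ∈ a :: t ∧ ∀ x ∈ a :: t, x ≤ t.getLastD a) := by
  intro t
  induction t with
  | nil => intro a _; simp
  | cons q t' ih =>
      intro a hpw
      have haq : a < q := (List.pairwise_cons.1 hpw).1 q (by simp)
      have hpw' := (List.pairwise_cons.1 hpw).2
      obtain ⟨hmem, hmax⟩ := ih q hpw'
      rw [List.getLastD_cons]
      refine ⟨List.mem_cons_of_mem a hmem, ?_⟩
      intro x hx
      rcases List.mem_cons.1 hx with rfl | hx'
      · have := hmax q (by simp); omega
      · exact hmax x hx'

lemma go_spec (S : List Int) (g : Int) : ∀ (t : List Int) (p : Int) (out : List Int),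
    p ∈ S → (∀ x ∈ t, x ∈ S) → List.Pairwise (· < ·) (p :: t) →
    (∀ x ∈ S, p < x → x ≤ t.getLastD p → x ∈ t) →
    fillGapsGo g p out t =
      out ++ (PySem.List.pyRange (p + 1) (t.getLastD p + 1)).filter (condA S g) := by
  intro t
  induction t with
  | nil =>
      intro p out _ _ _ _
      simp [fillGapsGo]
  | cons q t' ih =>
      intro p out hpS htS hpw hsub
      have hpq : p < q := (List.pairwise_cons.1 hpw).1 q (by simp)
      have hpw' : List.Pairwise (· < ·) (q :: t') := (List.pairwise_cons.1 hpw).2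
      have hqL : q ≤ t'.getLastD q := (pairwise_getLastD_max t' q hpw').2 q (by simp)
      have hLcons : (q :: t').getLastD p = t'.getLastD q := List.getLastD_cons ..
      have hqS : q ∈ S := htS q (by simp)
      have hsep : ∀ x ∈ S, x ≤ p ∨ q ≤ x := by
        intro x hx
        by_contra hcon
        push_neg at hcon
        have hxt : x ∈ q :: t' := hsub x hx hcon.1 (by rw [hLcons]; omega)
        rcases List.mem_cons.1 hxt with rfl | hx'
        · omega
        · have := (List.pairwise_cons.1 hpw').1 x hx'; omega
      have hsub' : ∀ x ∈ S, q < x → x ≤ t'.getLastD q → x ∈ t' := by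
        intro x hx h1 h2
        have hxt := hsub x hx (by omega) (by rw [hLcons]; exact h2)
        rcases List.mem_cons.1 hxt with rfl | hx'
        · omega
        · exact hx'
      have hsplit : PySem.List.pyRange (p + 1) (t'.getLastD q + 1) =
          PySem.List.pyRange (p + 1) (q + 1) ++ PySem.List.pyRange (q + 1) (t'.getLastD q + 1) :=
        PySem.List.pyRange_one_append _ _ _ (by omega) (by omega)
      rw [hLcons, hsplit, List.filter_append]
      have hseg := seg_filter g hpS hqS hpq hsep
      have ihq := fun out' => ih q out' hqS (fun x hx => htS x (by simp [hx])) hpw' hsub'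
      by_cases hg : q - p ≤ g + 1
      · rw [if_pos hg] at hseg
        simp only [fillGapsGo, if_pos hg]
        rw [ihq (out ++ PySem.List.pyRange (p + 1) (q + 1)), hseg, List.append_assoc]
      · rw [if_neg hg] at hseg
        simp only [fillGapsGo, if_neg hg]
        rw [ihq (out ++ [q]), hseg, List.append_assoc]

lemma fill_gaps_eq_alt (fl : List Int) (g : Int) : fill_gaps fl g = fill_gaps_alt fl g := by
  by_cases hlen : fl.length < 2
  · simp [fill_gaps, fill_gaps_alt, hlen]
  · have h2 : 2 ≤ fl.length := by omega
    -- name the shared subterms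
    obtain ⟨lo, h0⟩ : ∃ a, PySem.List.pyGet? fl 0 = some a := by
      cases h : PySem.List.pyGet? fl 0 with
      | none =>
          rw [PySem.List.pyGet?_eq_none_iff] at h
          exact absurd (by simp [PySem.Raise.InRange]; omega) h
      | some a => exact ⟨a, rfl⟩
    obtain ⟨hi, h1⟩ : ∃ a, PySem.List.pyGet? fl (-1) = some a := by
      cases h : PySem.List.pyGet? fl (-1) with
      | none =>
          rw [PySem.List.pyGet?_eq_none_iff] at h
          exact absurd (by simp [PySem.Raise.InRange]; omega) h
      | some a => exact ⟨a, rfl⟩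
    have hlofl : lo ∈ fl := PySem.List.mem_of_pyGet?_eq_some fl h0
    have hhifl : hi ∈ fl := PySem.List.mem_of_pyGet?_eq_some fl h1
    simp only [fill_gaps, fill_gaps_alt, if_neg hlen, h0, h1, Option.getD_some]
    set S : PySem.Set Int := PySem.Set.ofList fl with hS
    set W : PySem.Set Int :=
      PySem.Set.ofList (fl.filter (fun x => decide (lo ≤ x) && decide (x ≤ hi))) with hW
    set s : List Int := PySem.List.sorted W (fun x => x) with hs
    have hmem_s : ∀ x : Int, x ∈ s ↔ (x ∈ fl ∧ lo ≤ x ∧ x ≤ hi) := by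
      intro x
      rw [hs, (PySem.List.sorted_perm W (fun x => x) false).mem_iff, hW, PySem.Set.mem_ofList,
        List.mem_filter]
      simp
    have hnodup : s.Nodup := by
      rw [hs]
      exact ((PySem.List.sorted_perm W (fun x => x) false).nodup_iff).2
        (by rw [hW]; exact PySem.Set.nodup_ofList _)
    have hlt : List.Pairwise (· < ·) s := by
      have hle : List.Pairwise (· ≤ ·) s := by
        have := PySem.List.sorted_pairwise W (fun x => x)
        rwa [← hs] at this
      exact (hle.and hnodup).imp (fun h => lt_of_le_of_ne h.1 h.2)
    by_cases hlh : lo ≤ hi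
    · have hlos : lo ∈ s := (hmem_s lo).2 ⟨hlofl, le_refl _, hlh⟩
      have hhis : hi ∈ s := (hmem_s hi).2 ⟨hhifl, hlh, le_refl _⟩
      cases hse : s with
      | nil => rw [hse] at hlos; simp at hlos
      | cons a t =>
          have ha_s : a ∈ s := by rw [hse]; simp
          have halo : a = lo := by
            have h1' : lo ≤ a := ((hmem_s a).1 ha_s).2.1
            rw [hse] at hlos hlt
            rcases List.mem_cons.1 hlos with h' | h'
            · omega
            · have := (List.pairwise_cons.1 hlt).1 lo h'; omega
          have hmax := pairwise_getLastD_max t a (by rw [hse] at hlt; exact hlt)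
          have hLhi : t.getLastD a = hi := by
            have hL_s : t.getLastD a ∈ s := by rw [hse]; exact hmax.1
            have hLle : t.getLastD a ≤ hi := ((hmem_s _).1 hL_s).2.2
            have hhiL : hi ≤ t.getLastD a := hmax.2 hi (by rw [← hse]; exact hhis)
            omega
          show _ = fillGapsGo g a [a] t
          rw [go_spec S g t a [a]
            (by rw [hS, PySem.Set.mem_ofList]; rw [halo]; exact hlofl)
            (fun x hx => by
              rw [hS, PySem.Set.mem_ofList]
              exact ((hmem_s x).1 (by rw [hse]; exact List.mem_cons_of_mem a hx)).1)
            (by rw [hse] at hlt; exact hlt)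
            (by
              intro x hx h1' h2'
              rw [hS, PySem.Set.mem_ofList] at hx
              have hxs : x ∈ s := (hmem_s x).2 ⟨hx, by omega, by rw [hLhi] at h2'; exact h2'⟩
              rw [hse] at hxs
              rcases List.mem_cons.1 hxs with rfl | hx'
              · omega
              · exact hx')]
          rw [hLhi, halo]
          rw [PySem.List.pyRange_one_cons (by omega), List.filter_cons_of_pos
            (condA_of_mem (by rw [hS, PySem.Set.mem_ofList]; exact hlofl))]
          rfl
    · -- hi < lo: the full range is empty and nothing survives the window filter
      have hA : PySem.List.pyRange lo (hi + 1) = [] := by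
        refine List.eq_nil_iff_forall_not_mem.2 (fun x hx => ?_)
        have := PySem.List.mem_pyRange_one.1 hx; omega
      have hB : fl.filter (fun x => decide (lo ≤ x) && decide (x ≤ hi)) = [] := by
        refine List.filter_eq_nil_iff.2 (fun x _ => ?_)
        simp; omega
      rw [hA]
      have hsnil : s = [] := by
        rw [hs, PySem.List.sorted_eq_nil_iff, hW, hB]
        rfl
      rw [hsnil]
      rfl

-- ===== VERDICT (by name: the statement is the Claim_ definition above) =====
theorem fill_gaps_spec : Claim_equal_fill_gaps := by
  intro fl g _
  unfold Spec_fill_gaps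
  exact fill_gaps_eq_alt fl g
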